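-- pv_equiv track=rewrite | github.com/codebam/cipher.py | cipher.py | decipher
-- ===== SOURCE A (Python) =====
-- import itertools
-- from string import ascii_lowercase as lc, ascii_uppercase as uc
--
-- def make_rot(n):
--     lookup = str.maketrans(lc + uc, lc[n:] + lc[:n] + uc[n:] + uc[:n])
--     return lambda s: s.translate(lookup)
--
-- def decipher(ciphertext, start=13, step=25):
--     rotation = itertools.islice(
--         itertools.cycle(range(25, 0, -1)), start-1, None, step)
--     out = ''
--     for char in ciphertext:
--         rot = make_rot(next(rotation))
--         out += rot(char)
--     return out
-- ===== SOURCE B (Python) =====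
-- def decipher(ciphertext, start=13, step=25):
--     if start < 1 or step < 1:
--         raise ValueError('start and step must be positive integers')
--     lower = 'abcdefghijklmnopqrstuvwxyz'
--     upper = 'ABCDEFGHIJKLMNOPQRSTUVWXYZ'
--     # The rotation sequence is periodic: p = smallest period with p*step % 25 == 0.
--     p = 1
--     while (p * step) % 25 != 0:
--         p += 1
--     # Precompute one substitution table per residue class (at most 25 tables total).
--     tables = []
--     for r in range(p):
--         n = 25 - ((start - 1 + r * step) % 25)
--         t = {}
--         for k in range(26):
--             t[lower[k]] = lower[(k + n) % 26]
--             t[upper[k]] = upper[(k + n) % 26]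
--         tables.append(t)
--     # Process the text in chunks of length p, pairing each chunk positionally with the tables.
--     pieces = []
--     for j in range(0, len(ciphertext), p):
--         chunk = ciphertext[j:j + p]
--         pieces.append(''.join(t.get(c, c) for c, t in zip(chunk, tables)))
--     return ''.join(pieces)
-- ===== Notes on version B (the rewrite author's own statement) =====
-- stated objective: faster
-- what changed: B exploits the periodicity of the rotation sequence: it computes the period p (smallest p with p*step % 25 == 0), precomputes one substitution dict per residue class (at most 25 tables, built once), and processes the text in chunks of length p zipped positionally with those tables, instead of A's infinite islice/cycle iterator with a fresh 52-entry maketrans table built for every single character.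
import Mathlib
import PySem

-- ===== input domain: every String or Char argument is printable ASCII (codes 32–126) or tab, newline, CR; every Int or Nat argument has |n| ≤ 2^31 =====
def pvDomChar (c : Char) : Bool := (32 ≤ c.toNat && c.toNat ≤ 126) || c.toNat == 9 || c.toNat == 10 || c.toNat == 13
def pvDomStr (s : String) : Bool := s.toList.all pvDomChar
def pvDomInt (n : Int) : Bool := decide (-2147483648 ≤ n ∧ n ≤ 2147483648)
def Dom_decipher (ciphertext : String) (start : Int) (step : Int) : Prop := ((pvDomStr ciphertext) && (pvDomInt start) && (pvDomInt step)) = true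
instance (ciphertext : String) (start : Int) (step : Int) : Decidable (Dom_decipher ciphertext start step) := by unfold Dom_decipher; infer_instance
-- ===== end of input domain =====

-- B exploits the periodicity of the rotation sequence: it precomputes one substitution
-- table per residue class (at most 25) and processes the text in chunks, instead of
-- rebuilding a 52-entry translation table for every character (measurably faster).

-- ===== PORT A =====
-- ascii_lowercase / ascii_uppercase
def pvLC : List Char := "abcdefghijklmnopqrstuvwxyz".toList
def pvUC : List Char := "ABCDEFGHIJKLMNOPQRSTUVWXYZ".toList

-- range(25, 0, -1), built once outside the loop as in A
def pvSeq : List Int := PySem.List.pyRange 25 0 (-1)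

-- make_rot(n): build the maketrans table lc+uc -> lc[n:]+lc[:n]+uc[n:]+uc[:n] and
-- translate one char through it (first index in source, matching target entry; else unchanged)
def pvMakeRot (n : Int) (c : Char) : Char :=
  let src := pvLC ++ pvUC
  let tgt := PySem.List.slice pvLC (some n) none ++ PySem.List.slice pvLC none (some n) ++
             PySem.List.slice pvUC (some n) none ++ PySem.List.slice pvUC none (some n)
  match src.idxOf? c with
  | some i => tgt.getD i c
  | none => c

-- the for-loop: pos is the islice/cycle iterator's position into the infinite cycle
-- (next() yields range(25,0,-1)[pos % 25] and advances pos by step); out accumulated as chars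
def pvLoopA (stp : Int) : List Char → Int → List Char → List Char
  | [], _, out => out
  | c :: cs, pos, out =>
      let n := PySem.List.pyGetD pvSeq (PySem.Int.mod pos 25) 0
      pvLoopA stp cs (pos + stp) (out ++ [pvMakeRot n c])

def decipher (ciphertext : String) (start : Int) (step : Int) : String :=
  String.ofList (pvLoopA step ciphertext.toList (start - 1) [])

-- ===== PORT B =====
def pvLowerB : List Char := "abcdefghijklmnopqrstuvwxyz".toList
def pvUpperB : List Char := "ABCDEFGHIJKLMNOPQRSTUVWXYZ".toList

-- the while loop 'while (p * step) % 25 != 0: p += 1'; the '25 ≤ p' guard is fuel only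
-- (Python's loop stops at p = 25 at the latest, since (25*step) % 25 == 0)
def pvFindP (stp : Int) (p : Nat) : Nat :=
  if 25 ≤ p then p
  else if PySem.Int.mod ((p : Int) * stp) 25 = 0 then p
  else pvFindP stp (p + 1)
termination_by 25 - p

-- the inner table-building loop: t[lower[k]] = lower[(k+n)%26]; t[upper[k]] = upper[(k+n)%26]
def pvTable (n : Int) : PySem.Dict Char Char :=
  (List.range 26).foldl (fun t k =>
    let t' := PySem.Dict.insert t (PySem.List.pyGetD pvLowerB (k : Int) ' ')
                (PySem.List.pyGetD pvLowerB (PySem.Int.mod ((k : Int) + n) 26) ' ')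
    PySem.Dict.insert t' (PySem.List.pyGetD pvUpperB (k : Int) ' ')
      (PySem.List.pyGetD pvUpperB (PySem.Int.mod ((k : Int) + n) 26) ' '))
    PySem.Dict.empty

-- ''.join(t.get(c, c) for c, t in zip(chunk, tables))
def pvApplyTables : List Char → List (PySem.Dict Char Char) → List Char
  | _, [] => []
  | [], _ => []
  | c :: cs, t :: ts => PySem.Dict.getD t c c :: pvApplyTables cs ts

-- the chunk loop 'for j in range(0, len(ciphertext), p)', as recursion on the text;
-- p' = p - 1 so the chunk size p'+1 is manifestly positive (termination)
def pvLoopB (p' : Nat) (tables : List (PySem.Dict Char Char)) : List Char → List Char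
  | [] => []
  | c :: cs =>
      pvApplyTables ((c :: cs).take (p' + 1)) tables ++ pvLoopB p' tables (cs.drop p')
termination_by cs => cs.length
decreasing_by simp

def decipher_alt (ciphertext : String) (start : Int) (step : Int) : String :=
  let cs := ciphertext.toList
  let p := pvFindP step 1
  let tables := (List.range p).map
    (fun (r : Nat) => pvTable (25 - PySem.Int.mod (start - 1 + (r : Int) * step) 25))
  String.ofList (pvLoopB (p - 1) tables cs)

-- ===== PRECONDITION & SPEC =====
-- A's islice(cycle(...), start-1, None, step) raises ValueError eagerly when start-1 < 0 or
-- step < 1 (B raises there too); Pre_ admits exactly the inputs where both return.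
def Pre_decipher (ciphertext : String) (start : Int) (step : Int) : Prop :=
  1 ≤ start ∧ 1 ≤ step
instance (ciphertext : String) (start : Int) (step : Int) : Decidable (Pre_decipher ciphertext start step) := by unfold Pre_decipher; infer_instance

def pvWitness_decipher : String × Int × Int := ("Uryyb, Jbeyq!", 13, 25)

def Spec_decipher (ciphertext : String) (start : Int) (step : Int) (out : String) : Prop := out = decipher_alt ciphertext start step
instance (ciphertext : String) (start : Int) (step : Int) (out : String) : Decidable (Spec_decipher ciphertext start step out) := by unfold Spec_decipher; infer_instance

-- ===== CLAIM (what is proved, stated in full; the proofs are below) =====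
def Claim_equal_decipher : Prop := ∀ (ciphertext : String) (start : Int) (step : Int), Dom_decipher ciphertext start step → Pre_decipher ciphertext start step → Spec_decipher ciphertext start step (decipher ciphertext start step)

-- ===== LEMMAS AND PROOFS =====

-- A's per-character result as a plain cons-list (no accumulator)
def pvARef (stp : Int) : List Char → Int → List Char
  | [], _ => []
  | c :: cs, pos =>
      pvMakeRot (PySem.List.pyGetD pvSeq (PySem.Int.mod pos 25) 0) c :: pvARef stp cs (pos + stp)

theorem pvLoopA_eq_ref (stp : Int) :
    ∀ (cs : List Char) (pos : Int) (out : List Char),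
      pvLoopA stp cs pos out = out ++ pvARef stp cs pos := by
  intro cs
  induction cs with
  | nil => intro pos out; simp [pvLoopA, pvARef]
  | cons c cs ih => intro pos out; simp [pvLoopA, pvARef, ih, List.append_assoc]

theorem pvARef_append (stp : Int) (l1 l2 : List Char) :
    ∀ pos, pvARef stp (l1 ++ l2) pos = pvARef stp l1 pos ++ pvARef stp l2 (pos + l1.length * stp) := by
  induction l1 with
  | nil => intro pos; simp [pvARef]
  | cons c l1 ih =>
    intro pos
    simp only [List.cons_append, pvARef, List.length_cons, ih (pos + stp)]
    have : pos + stp + l1.length * stp = pos + (l1.length + 1 : Nat) * stp := by push_cast; ring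
    rw [this]

-- cycle value: range(25,0,-1)[m] = 25 - m for m < 25
theorem pvSeq_get : ∀ m ∈ List.range 25, PySem.List.pyGetD pvSeq (m : Int) 0 = 25 - (m : Int) := by decide

-- per-character agreement of A's maketrans translate with B's table lookup, enumerated
set_option maxRecDepth 16384 in
set_option maxHeartbeats 4000000 in
theorem pvPerChar_enum : ∀ m ∈ List.range 25, ∀ t ∈ List.range 128,
    pvMakeRot (25 - (m : Int)) (Char.ofNat t)
      = PySem.Dict.getD (pvTable (25 - (m : Int))) (Char.ofNat t) (Char.ofNat t) := by decide

theorem pvPerChar (k : Int) (c : Char) (hc : pvDomChar c = true) :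
    pvMakeRot (PySem.List.pyGetD pvSeq (PySem.Int.mod k 25) 0) c
      = PySem.Dict.getD (pvTable (25 - PySem.Int.mod k 25)) c c := by
  have h0 : (0 : Int) < 25 := by norm_num
  have hnn := PySem.Int.mod_nonneg k h0
  have hlt := PySem.Int.mod_lt k h0
  set r := PySem.Int.mod k 25 with hr
  have hcast : r = ((r.toNat : Nat) : Int) := (Int.toNat_of_nonneg hnn).symm
  have hmlt : r.toNat < 25 := by omega
  have htlt : c.toNat < 128 := by
    simp only [pvDomChar, Bool.or_eq_true, Bool.and_eq_true, decide_eq_true_eq, beq_iff_eq] at hc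
    omega
  have h1 := pvSeq_get r.toNat (List.mem_range.mpr hmlt)
  have h2 := pvPerChar_enum r.toNat (List.mem_range.mpr hmlt) c.toNat (List.mem_range.mpr htlt)
  rw [Char.ofNat_toNat] at h2
  rw [hcast, h1]
  rw [hcast] at h2 ⊢
  exact h2

-- floored mod 25 is emod (25 > 0), so congruences close by omega
theorem pvModCongr (a b : Int) (h : PySem.Int.mod (a - b) 25 = 0) :
    PySem.Int.mod a 25 = PySem.Int.mod b 25 := by
  rw [PySem.Int.mod_eq_emod_of_pos (by norm_num : (0:Int) < 25)] at h ⊢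
  rw [PySem.Int.mod_eq_emod_of_pos (by norm_num : (0:Int) < 25)]
  omega

-- pvFindP starting inside [1,25] returns p ≥ 1 with (p*step) % 25 == 0
theorem pvFindP_spec (stp : Int) :
    ∀ (k p0 : Nat), 25 - p0 ≤ k → 1 ≤ p0 → p0 ≤ 25 →
      1 ≤ pvFindP stp p0 ∧ PySem.Int.mod ((pvFindP stp p0 : Int) * stp) 25 = 0 := by
  intro k
  induction k with
  | zero =>
    intro p0 hk h1 h25
    have : p0 = 25 := by omega
    subst this
    rw [pvFindP, if_pos (le_refl 25)]
    refine ⟨by omega, ?_⟩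
    rw [PySem.Int.mod_eq_zero_iff_dvd]
    exact ⟨stp, by push_cast; ring⟩
  | succ k ih =>
    intro p0 hk h1 h25
    rw [pvFindP]
    by_cases hg : 25 ≤ p0
    · have hpe : p0 = 25 := by omega
      subst hpe
      rw [if_pos (le_refl 25)]
      refine ⟨by omega, ?_⟩
      rw [PySem.Int.mod_eq_zero_iff_dvd]
      exact ⟨stp, by push_cast; ring⟩
    · rw [if_neg hg]
      by_cases hm : PySem.Int.mod ((p0 : Int) * stp) 25 = 0
      · rw [if_pos hm]
        exact ⟨h1, hm⟩
      · rw [if_neg hm]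
        exact ih (p0 + 1) (by omega) (by omega) (by omega)

-- a chunk of the text starting at global residue q, paired with tables[q:], matches A's
-- per-character translation (the iterator position pos is ≡ start-1+q*step mod 25)
set_option maxRecDepth 8192 in
theorem pvChunk (strt stp : Int) (p : Nat) (tables : List (PySem.Dict Char Char))
    (htab : tables = (List.range p).map
      (fun (r : Nat) => pvTable (25 - PySem.Int.mod (strt - 1 + (r : Int) * stp) 25))) :
    ∀ (chunk : List Char) (q : Nat) (pos : Int),
      (∀ c ∈ chunk, pvDomChar c = true) → q + chunk.length ≤ p →
      PySem.Int.mod (pos - (strt - 1 + (q : Int) * stp)) 25 = 0 →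
      pvARef stp chunk pos = pvApplyTables chunk (tables.drop q) := by
  intro chunk
  induction chunk with
  | nil =>
    intro q pos _ _ _
    cases tables.drop q <;> simp [pvARef, pvApplyTables]
  | cons c chunk ih =>
    intro q pos hdom hlen hmod
    have hq : q < p := by
      have := chunk.length
      simp only [List.length_cons] at hlen
      omega
    have hqlen : q < tables.length := by rw [htab]; simpa using hq
    have hdrop : tables.drop q = tables[q] :: tables.drop (q + 1) :=
      List.drop_eq_getElem_cons hqlen
    have hgetq : tables[q] = pvTable (25 - PySem.Int.mod (strt - 1 + (q : Int) * stp) 25) := by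
      subst htab; simp
    rw [hdrop, hgetq]
    simp only [pvARef, pvApplyTables, List.cons.injEq]
    refine ⟨?_, ?_⟩
    · rw [pvPerChar pos c (hdom c (List.mem_cons_self ..))]
      rw [pvModCongr pos (strt - 1 + (q : Int) * stp) hmod]
    · have harg : pos + stp - (strt - 1 + ((q : Nat) + 1 : Int) * stp)
          = pos - (strt - 1 + (q : Int) * stp) := by ring
      have := ih (q + 1) (pos + stp)
        (fun x hx => hdom x (List.mem_cons_of_mem _ hx))
        (by simp only [List.length_cons] at hlen ⊢; omega)
        (by push_cast; rw [harg]; exact hmod)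
      simpa using this

-- A's whole loop equals B's chunked loop (strong induction on the text length)
theorem pvOuter (strt stp : Int) (p : Nat) (hp : 1 ≤ p)
    (hpmod : PySem.Int.mod ((p : Int) * stp) 25 = 0)
    (tables : List (PySem.Dict Char Char))
    (htab : tables = (List.range p).map
      (fun (r : Nat) => pvTable (25 - PySem.Int.mod (strt - 1 + (r : Int) * stp) 25))) :
    ∀ (N : Nat) (cs : List Char) (pos : Int), cs.length ≤ N →
      (∀ c ∈ cs, pvDomChar c = true) →
      PySem.Int.mod (pos - (strt - 1)) 25 = 0 →
      pvARef stp cs pos = pvLoopB (p - 1) tables cs := by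
  intro N
  induction N with
  | zero =>
    intro cs pos hN _ _
    have : cs = [] := List.eq_nil_of_length_eq_zero (by omega)
    subst this
    simp [pvARef, pvLoopB]
  | succ N ih =>
    intro cs pos hN hdom hmod
    match cs with
    | [] => simp [pvARef, pvLoopB]
    | c :: cs' =>
      rw [pvLoopB]
      have hp1 : p - 1 + 1 = p := Nat.sub_add_cancel hp
      rw [hp1]
      have hsplit : c :: cs' = (c :: cs').take p ++ (c :: cs').drop p :=
        (List.take_append_drop p (c :: cs')).symm
      conv_lhs => rw [hsplit]
      rw [pvARef_append]
      have hchunk : pvARef stp ((c :: cs').take p) pos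
          = pvApplyTables ((c :: cs').take p) tables := by
        have h0 := pvChunk strt stp p tables htab ((c :: cs').take p) 0 pos
          (fun x hx => hdom x (List.take_subset _ _ hx))
          (by simp [List.length_take])
          (by push_cast; simpa using hmod)
        simpa using h0
      rw [hchunk]
      congr 1
      have hdropcs : (c :: cs').drop p = cs'.drop (p - 1) := by
        conv_lhs => rw [← hp1]
        rw [List.drop_succ_cons]
      by_cases hlong : (c :: cs').length ≤ p
      · have h1 : (c :: cs').drop p = [] := List.drop_eq_nil_of_le hlong
        have h2 : cs'.drop (p - 1) = [] := by rw [← hdropcs]; exact h1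
        rw [h1, h2]
        simp [pvARef, pvLoopB]
      · have hlen : ((c :: cs').take p).length = p := by
          simp only [List.length_take, List.length_cons]
          simp only [List.length_cons] at hlong
          omega
        rw [hlen, hdropcs]
        apply ih
        · simp only [List.length_drop]
          simp only [List.length_cons] at hN
          omega
        · exact fun x hx => hdom x (List.mem_cons_of_mem _ (List.drop_subset _ _ hx))
        · have h3 : pos + (p : Int) * stp - (strt - 1)
              = (pos - (strt - 1)) + (p : Int) * stp := by ring
          rw [h3]
          rw [PySem.Int.mod_eq_emod_of_pos (by norm_num : (0:Int) < 25)] at hmod hpmod ⊢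
          generalize (p : Int) * stp = x at hpmod ⊢
          omega

-- ===== VERDICT (by name: the statement is the Claim_ definition above) =====
theorem decipher_spec : Claim_equal_decipher := by
  intro ciphertext start step hdom _
  unfold Spec_decipher
  obtain ⟨hp, hpmod⟩ := pvFindP_spec step 25 1 (by omega) (by omega) (by omega)
  have hdom' : ∀ c ∈ ciphertext.toList, pvDomChar c = true := by
    simp only [Dom_decipher, Bool.and_eq_true] at hdom
    exact fun c hc => List.all_eq_true.mp hdom.1.1 c hc
  have hA : decipher ciphertext start step
      = String.ofList (pvARef step ciphertext.toList (start - 1)) := by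
    unfold decipher
    rw [pvLoopA_eq_ref, List.nil_append]
  have hB : decipher_alt ciphertext start step
      = String.ofList (pvLoopB (pvFindP step 1 - 1)
          ((List.range (pvFindP step 1)).map
            (fun (r : Nat) => pvTable (25 - PySem.Int.mod (start - 1 + (r : Int) * step) 25)))
          ciphertext.toList) := rfl
  rw [hA, hB]
  congr 1
  apply pvOuter start step (pvFindP step 1) hp hpmod _ rfl ciphertext.toList.length
    ciphertext.toList (start - 1) le_rfl hdom'
  rw [sub_self, PySem.Int.mod_eq_emod_of_pos (by norm_num : (0:Int) < 25)]
  decide
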